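-- pv_equiv track=rewrite | github.com/vinchinzu/euler | python/333.py | generate_terms
-- ===== SOURCE A (Python) =====
-- from typing import Dict, List, Tuple
--
-- def generate_terms(limit: int) -> List[Tuple[int, int, int]]:
--     """Return (value, exp2, exp3) for all 2**exp2 * 3**exp3 <= limit, excluding 1."""
--
--     terms: List[Tuple[int, int, int]] = []
--     value2 = 1
--     exp2 = 0
--     while value2 <= limit:
--         value3 = value2
--         exp3 = 0
--         while value3 <= limit:
--             if value3 > 1:
--                 terms.append((value3, exp2, exp3))
--             value3 *= 3
--             exp3 += 1
--         value2 *= 2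
--         exp2 += 1
--
--     terms.sort(key=lambda item: (item[1], -item[2]))  # exp2 asc, exp3 desc
--     return terms
-- ===== SOURCE B (Python) =====
-- from typing import List, Tuple
--
--
-- def generate_terms(limit: int) -> List[Tuple[int, int, int]]:
--     """Return (value, exp2, exp3) for all 2**exp2 * 3**exp3 <= limit, excluding 1.
--
--     Generates the terms directly in the final order (exp2 ascending, exp3
--     descending), so no sort is needed.
--     """
--     terms: List[Tuple[int, int, int]] = []
--     power2 = 1
--     exp2 = 0
--     while power2 <= limit:
--         # largest exp3 with power2 * 3**exp3 <= limit
--         top = 0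
--         probe = power2
--         while probe * 3 <= limit:
--             probe *= 3
--             top += 1
--         low = 1 if exp2 == 0 else 0  # skip the value 1 (exp2 == exp3 == 0)
--         for exp3 in range(top, low - 1, -1):
--             terms.append((power2 * 3 ** exp3, exp2, exp3))
--         power2 *= 2
--         exp2 += 1
--     return terms
-- ===== Notes on version B (the rewrite author's own statement) =====
-- stated objective: alternative
-- what changed: B drops A's final sort entirely: for each power of two it first probes the maximal power-of-three exponent and then emits the terms directly in the final order (exp2 ascending, exp3 descending), with the countdown's lower bound chosen so that the unit value is skipped exactly as in A.
import Mathlib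
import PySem

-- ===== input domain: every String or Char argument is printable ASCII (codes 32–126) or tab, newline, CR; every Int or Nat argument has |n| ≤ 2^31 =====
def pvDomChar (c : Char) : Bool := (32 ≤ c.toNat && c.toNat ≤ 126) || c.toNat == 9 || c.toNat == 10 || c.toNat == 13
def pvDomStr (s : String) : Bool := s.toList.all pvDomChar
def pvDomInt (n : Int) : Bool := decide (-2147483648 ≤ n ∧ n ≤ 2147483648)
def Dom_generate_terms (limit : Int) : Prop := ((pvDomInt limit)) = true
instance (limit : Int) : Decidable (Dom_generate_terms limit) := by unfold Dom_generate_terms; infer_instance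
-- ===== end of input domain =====

-- B generates the terms directly in the final order (exp2 asc, exp3 desc) instead of
-- generating exp3 ascending and sorting at the end; same return value, different decomposition.

-- ===== PORT A =====
-- inner `while value3 <= limit` loop; the hypothesis `1 ≤ value3` is carried for
-- termination only (A always reaches this loop with value3 ≥ 1)
def genA_inner (limit exp2 value3 exp3 : Int) (h : 1 ≤ value3) : List (Int × Int × Int) :=
  if value3 ≤ limit then
    (if 1 < value3 then [(value3, exp2, exp3)] else []) ++
      genA_inner limit exp2 (value3 * 3) (exp3 + 1) (by omega)
  else []
termination_by (limit + 1 - value3).toNat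
decreasing_by simp_wf; omega

-- outer `while value2 <= limit` loop
def genA_outer (limit value2 exp2 : Int) (h : 1 ≤ value2) : List (Int × Int × Int) :=
  if value2 ≤ limit then
    genA_inner limit exp2 value2 0 h ++ genA_outer limit (value2 * 2) (exp2 + 1) (by omega)
  else []
termination_by (limit + 1 - value2).toNat
decreasing_by simp_wf; omega

def generate_terms (limit : Int) : List (Int × Int × Int) :=
  PySem.List.sorted2 (genA_outer limit 1 0 (by norm_num)) (fun t => t.2.1) (fun t => -t.2.2)

-- ===== PORT B =====
-- `while probe * 3 <= limit` probe loop: largest exp3 with power2 * 3**exp3 <= limit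
def genB_probe (limit probe top : Int) (h : 1 ≤ probe) : Int :=
  if probe * 3 ≤ limit then genB_probe limit (probe * 3) (top + 1) (by omega) else top
termination_by (limit - probe).toNat
decreasing_by simp_wf; omega

-- outer `while power2 <= limit` loop; `3 ** exp3` is ported as `3 ^ e.toNat`
-- (exact: every e in the countdown range is ≥ 0)
def genB_loop (limit power2 exp2 : Int) (h : 1 ≤ power2) : List (Int × Int × Int) :=
  if power2 ≤ limit then
    let top := genB_probe limit power2 0 h
    let low : Int := if exp2 = 0 then 1 else 0
    ((PySem.List.pyRange top (low - 1) (-1)).map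
        (fun e => (power2 * 3 ^ e.toNat, exp2, e))) ++
      genB_loop limit (power2 * 2) (exp2 + 1) (by omega)
  else []
termination_by (limit + 1 - power2).toNat
decreasing_by simp_wf; omega

def generate_terms_alt (limit : Int) : List (Int × Int × Int) :=
  genB_loop limit 1 0 (by norm_num)

-- ===== PRECONDITION & SPEC =====
def Spec_generate_terms (limit : Int) (out : List (Int × Int × Int)) : Prop := out = generate_terms_alt limit
instance (limit : Int) (out : List (Int × Int × Int)) : Decidable (Spec_generate_terms limit out) := by unfold Spec_generate_terms; infer_instance

-- ===== CLAIM (what is proved, stated in full; the proofs are below) =====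
def Claim_equal_generate_terms : Prop := ∀ (limit : Int), Dom_generate_terms limit → Spec_generate_terms limit (generate_terms limit)

-- ===== LEMMAS AND PROOFS =====

-- the sort key (exp2, -exp3), as one lexicographic key
def lexKey (t : Int × Int × Int) : Lex (Int × Int) := toLex (t.2.1, -t.2.2)

lemma sorted2_as_sorted (xs : List (Int × Int × Int)) :
    PySem.List.sorted2 xs (fun t => t.2.1) (fun t => -t.2.2) =
    PySem.List.sorted xs lexKey := by
  unfold PySem.List.sorted2 PySem.List.sorted
  have hbe : (fun a b : Int × Int × Int =>
        decide (a.2.1 < b.2.1) || (!decide (b.2.1 < a.2.1) && decide (-a.2.2 < -b.2.2)))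
      = fun a b : Int × Int × Int => decide (lexKey a < lexKey b) := by
    funext a b
    rw [Bool.eq_iff_iff]
    simp only [lexKey, Prod.Lex.lt_iff, ofLex_toLex, Bool.or_eq_true, Bool.and_eq_true,
      Bool.not_eq_true', decide_eq_true_eq, decide_eq_false_iff_not]
    omega
  simp only [if_neg (by decide : ¬ (false = true)), hbe]

lemma probe_spec (limit : Int) : ∀ (p e : Int) (h : 1 ≤ p), p ≤ limit →
    ∃ k : Nat, genB_probe limit p e h = e + k ∧ p * 3 ^ k ≤ limit ∧ limit < p * 3 ^ (k + 1) := by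
  intro p e h hle
  induction p, e, h using genB_probe.induct limit with
  | case1 p e h hrec ih =>
    obtain ⟨k, hk1, hk2, hk3⟩ := ih (by omega)
    refine ⟨k + 1, ?_, ?_, ?_⟩
    · rw [genB_probe, if_pos hrec, hk1]; push_cast; ring
    · calc p * 3 ^ (k+1) = p * 3 * 3 ^ k := by ring
        _ ≤ limit := hk2
    · calc limit < p * 3 * 3 ^ (k+1) := hk3
        _ = p * 3 ^ (k+2) := by ring
  | case2 p e h hrec =>
    refine ⟨0, ?_, by simpa using hle, by push Not at hrec; simpa using hrec⟩
    rw [genB_probe, if_neg hrec]; simp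

lemma pow3_le_iff (p limit : Int) (hp : 1 ≤ p) (k : Nat)
    (hk : p * 3 ^ k ≤ limit) (hk1 : limit < p * 3 ^ (k + 1)) (j : Nat) :
    p * 3 ^ j ≤ limit ↔ j ≤ k := by
  constructor
  · intro hj
    by_contra hgt
    push Not at hgt
    have h1 : (3:Int) ^ (k+1) ≤ 3 ^ j := pow_le_pow_right₀ (by norm_num) hgt
    nlinarith
  · intro hj
    have h1 : (3:Int) ^ j ≤ 3 ^ k := pow_le_pow_right₀ (by norm_num) hj
    nlinarith

lemma asc_closed (limit exp2 p : Int) (hp : 1 ≤ p) (k : Nat)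
    (hk : p * 3 ^ k ≤ limit) (hk1 : limit < p * 3 ^ (k + 1)) :
    ∀ (j : Nat), 1 < p * 3 ^ j → ∀ (h : 1 ≤ p * 3 ^ j),
      genA_inner limit exp2 (p * 3 ^ j) (j : Int) h =
        (PySem.List.pyRange (j : Int) ((k : Int) + 1) 1).map
          (fun e => (p * 3 ^ e.toNat, exp2, e)) := by
  have key : ∀ (n : Nat) (j : Nat), k + 1 - j ≤ n → 1 < p * 3 ^ j → ∀ (h : 1 ≤ p * 3 ^ j),
      genA_inner limit exp2 (p * 3 ^ j) (j : Int) h =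
        (PySem.List.pyRange (j : Int) ((k : Int) + 1) 1).map
          (fun e => (p * 3 ^ e.toNat, exp2, e)) := by
    intro n
    induction n with
    | zero =>
      intro j hn hgt h
      have hj : k < j := by omega
      have hng : ¬ (p * 3 ^ j ≤ limit) := by
        rw [pow3_le_iff p limit hp k hk hk1 j]; omega
      rw [genA_inner, if_neg hng, PySem.List.pyRange_one_eq_nil (by omega), List.map_nil]
    | succ n ih =>
      intro j hn hgt h
      by_cases hj : j ≤ k
      · have hle : p * 3 ^ j ≤ limit := (pow3_le_iff p limit hp k hk hk1 j).mpr hj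
        rw [genA_inner, if_pos hle, if_pos hgt]
        have e1 : p * 3 ^ j * 3 = p * 3 ^ (j + 1) := by ring
        have e2 : (j : Int) + 1 = ((j + 1 : Nat) : Int) := by push_cast; ring
        rw [PySem.List.pyRange_one_cons (by omega), List.map_cons,
          Int.toNat_natCast]
        simp only [e1, e2]
        rw [ih (j + 1) (by omega) (by nlinarith [pow_pos (by norm_num : (0:Int) < 3) j])]
        rw [List.singleton_append]
      · have hng : ¬ (p * 3 ^ j ≤ limit) := by
          rw [pow3_le_iff p limit hp k hk hk1 j]; omega
        rw [genA_inner, if_neg hng, PySem.List.pyRange_one_eq_nil (by push_cast; omega),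
          List.map_nil]
  exact fun j => key (k + 1 - j) j le_rfl

-- A's inner loop from (value3 = p, exp3 = 0) produces the ascending row starting at
-- exponent 1 (when p = 1, dropping the value 1) or 0 (when p ≥ 2)
lemma rowA_eq (limit exp2 p : Int) (hp : 1 ≤ p) (hiff : p = 1 ↔ exp2 = 0)
    (hle : p ≤ limit) (k : Nat) (hk : p * 3 ^ k ≤ limit) (hk1 : limit < p * 3 ^ (k + 1))
    (h : 1 ≤ p) :
    genA_inner limit exp2 p 0 h =
      (PySem.List.pyRange (if exp2 = 0 then 1 else 0) ((k : Int) + 1) 1).map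
        (fun e => (p * 3 ^ e.toNat, exp2, e)) := by
  by_cases he : exp2 = 0
  · have hp1 : p = 1 := hiff.mpr he
    subst hp1 he
    rw [genA_inner, if_pos hle, if_neg (by norm_num)]
    have e1 : (1 : Int) * 3 = 1 * 3 ^ (1 : Nat) := by norm_num
    have := asc_closed limit 0 1 hp k hk hk1 1 (by norm_num) (by norm_num)
    simp only [e1, Nat.cast_one] at this ⊢
    rw [show (0 : Int) + 1 = 1 by ring, this]
    simp
  · have hp1 : 1 < p := by
      rcases lt_or_eq_of_le hp with h1 | h1
      · exact h1
      · exact absurd (hiff.mp h1.symm) he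
    have := asc_closed limit exp2 p hp k hk hk1 0 (by simpa) (by simpa)
    simp only [pow_zero, mul_one, Nat.cast_zero] at this
    rw [this, if_neg he]

lemma main_loop (limit : Int) : ∀ (p exp2 : Int) (h : 1 ≤ p),
    (p = 1 ↔ exp2 = 0) → 0 ≤ exp2 →
    (genB_loop limit p exp2 h).Perm (genA_outer limit p exp2 h) ∧
    (genB_loop limit p exp2 h).Pairwise (fun a b => lexKey a < lexKey b) ∧
    (∀ t ∈ genB_loop limit p exp2 h, exp2 ≤ t.2.1) := by
  intro p exp2 h
  induction p, exp2, h using genB_loop.induct limit with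
  | case1 p exp2 h hle ih =>
    intro hiff hnn
    obtain ⟨hperm, hpw, hbound⟩ := ih (by constructor <;> (intro hx; omega)) (by omega)
    obtain ⟨k, htop, hk2, hk3⟩ := probe_spec limit p 0 h hle
    set low : Int := if exp2 = 0 then 1 else 0 with hlow
    have hrowA := rowA_eq limit exp2 p h hiff hle k hk2 hk3 h
    have hrange : PySem.List.pyRange (genB_probe limit p 0 h) (low - 1) (-1)
        = (PySem.List.pyRange low ((k : Int) + 1) 1).reverse := by
      rw [htop, PySem.List.pyRange_neg_one_eq_reverse]
      norm_num
    have hB : genB_loop limit p exp2 h =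
        ((PySem.List.pyRange low ((k : Int) + 1) 1).map
            (fun e => (p * 3 ^ e.toNat, exp2, e))).reverse ++
          genB_loop limit (p * 2) (exp2 + 1) (by omega) := by
      rw [genB_loop, if_pos hle]
      simp only [← hlow, hrange, List.map_reverse]
    have hA : genA_outer limit p exp2 h =
        ((PySem.List.pyRange low ((k : Int) + 1) 1).map
            (fun e => (p * 3 ^ e.toNat, exp2, e))) ++
          genA_outer limit (p * 2) (exp2 + 1) (by omega) := by
      rw [genA_outer, if_pos hle, hrowA]
    have hmemrow : ∀ t ∈ (PySem.List.pyRange low ((k : Int) + 1) 1).map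
        (fun e => (p * 3 ^ e.toNat, exp2, e)), t.2.1 = exp2 := by
      intro t ht
      obtain ⟨e, -, rfl⟩ := List.mem_map.mp ht
      rfl
    refine ⟨?_, ?_, ?_⟩
    · rw [hB, hA]
      exact ((List.reverse_perm _).append hperm)
    · rw [hB]
      rw [List.pairwise_append]
      refine ⟨?_, hpw, ?_⟩
      · rw [List.pairwise_reverse, List.pairwise_map]
        refine (PySem.List.pairwise_lt_pyRange_one low ((k : Int) + 1)).imp ?_
        intro a b hab
        simp only [lexKey, Prod.Lex.lt_iff, ofLex_toLex]
        exact Or.inr ⟨trivial, by omega⟩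
      · intro a ha b hb
        rw [List.mem_reverse] at ha
        have h1 := hmemrow a ha
        have h2 := hbound b hb
        simp only [lexKey, Prod.Lex.lt_iff, ofLex_toLex]
        omega
    · intro t ht
      rw [hB, List.mem_append, List.mem_reverse] at ht
      rcases ht with ht | ht
      · rw [hmemrow t ht]
      · have := hbound t ht
        omega
  | case2 p exp2 h hle =>
    intro _ _
    rw [genB_loop, if_neg hle, genA_outer, if_neg hle]
    exact ⟨List.Perm.refl _, List.Pairwise.nil, by simp⟩

-- ===== VERDICT (by name: the statement is the Claim_ definition above) =====
theorem generate_terms_spec : Claim_equal_generate_terms := by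
  intro limit _
  unfold Spec_generate_terms generate_terms generate_terms_alt
  obtain ⟨hperm, hpw, -⟩ := main_loop limit 1 0 (by norm_num) (by simp) le_rfl
  rw [sorted2_as_sorted]
  exact PySem.List.sorted_eq_of_perm_of_pairwise_lt _ _ _ hperm hpw
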